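-- pv_equiv track=rewrite | github.com/pmatos/aoc2025 | day2/problem.py | generate_invalid_ids_part2_in_range
-- ===== SOURCE A (Python) =====
-- def generate_invalid_ids_part2_in_range(start: int, end: int) -> set[int]:
--     """Generate all invalid IDs (repeated at least twice) in range [start, end]."""
--     invalid_ids: set[int] = set()
--
--     # For pattern length n and repetition count k >= 2
--     # Total length L = n * k
--     # Multiplier M = (10^(n*k) - 1) / (10^n - 1)
--
--     n = 1
--     while True:
--         base_min = 10**(n-1) if n > 1 else 1
--         base_max = 10**n - 1
--
--         # Smallest possible ID with pattern length n is base_min repeated twice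
--         # Multiplier for k=2 is 10^n + 1
--         smallest_id = base_min * (10**n + 1)
--         if smallest_id > end:
--             break
--
--         k = 2
--         while True:
--             total_len = n * k
--             # Multiplier = (10^(n*k) - 1) / (10^n - 1)
--             multiplier = (10**(n*k) - 1) // (10**n - 1)
--
--             min_id = base_min * multiplier
--             max_id = base_max * multiplier
--
--             if min_id > end:
--                 break
--
--             x_start = max(base_min, (start + multiplier - 1) // multiplier)
--             x_end = min(base_max, end // multiplier)
--
--             for x in range(x_start, x_end + 1):
--                 invalid_id = x * multiplier
--                 if start <= invalid_id <= end:
--                     invalid_ids.add(invalid_id)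
--
--             k += 1
--
--         n += 1
--
--     return invalid_ids
-- ===== SOURCE B (Python) =====
-- def generate_invalid_ids_part2_in_range(start: int, end: int) -> set[int]:
--     """Generate all invalid IDs (repeated at least twice) in range [start, end].
--
--     Recursive stream version: `reps` lists, for one block-digit-count (block
--     values in [lo, p)), the in-range multiples of the repunit-style multiplier
--     for every repetition count; `blocks` chains those streams over growing
--     block lengths.  The multiplier is maintained by the Horner recurrence
--     mult -> mult*p + 1 instead of powers and floor/ceil divisions, and
--     candidates are filtered instead of clamping the x-range.
--     """
--     def reps(mult: int, p: int, lo: int) -> list[int]: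
--         if lo * mult > end:
--             return []
--         return [x * mult for x in range(lo, p) if start <= x * mult <= end] \
--             + reps(mult * p + 1, p, lo)
--
--     def blocks(lo: int, p: int) -> list[int]:
--         if lo * (p + 1) > end:
--             return []
--         return reps(p + 1, p, lo) + blocks(p, p * 10)
--
--     return set(blocks(1, 10))
-- ===== Notes on version B (the rewrite author's own statement) =====
-- stated objective: alternative
-- what changed: A's imperative nested while-loops that recompute a closed-form multiplier with powers and floor-division and clamp each x-range with ceiling/floor divides are replaced by two recursive list-comprehension generators that maintain the power and the repunit multiplier incrementally (Horner recurrence mult -> mult*p+1), filter candidates instead of clamping, and deduplicate the concatenated stream once with set().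
import Mathlib
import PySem

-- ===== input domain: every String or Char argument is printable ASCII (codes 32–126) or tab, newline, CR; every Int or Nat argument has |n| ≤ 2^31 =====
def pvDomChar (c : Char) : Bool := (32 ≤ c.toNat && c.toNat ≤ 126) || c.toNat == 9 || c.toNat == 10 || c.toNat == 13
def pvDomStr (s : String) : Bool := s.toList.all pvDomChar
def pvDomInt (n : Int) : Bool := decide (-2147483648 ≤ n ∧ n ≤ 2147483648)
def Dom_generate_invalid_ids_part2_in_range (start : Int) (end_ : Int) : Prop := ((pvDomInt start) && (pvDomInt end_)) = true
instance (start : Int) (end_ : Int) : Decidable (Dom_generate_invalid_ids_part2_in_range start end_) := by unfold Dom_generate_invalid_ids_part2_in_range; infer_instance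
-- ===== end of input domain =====

-- B replaces A's closed-form multiplier/power arithmetic and ceil/floor-clamped x-ranges by two
-- recursive stream generators (Horner-maintained multiplier, filtered candidate ranges) deduplicated
-- once at the end with set(); objective: alternative structure, same results, similar cost.

-- ===== PORT A =====
-- Helper lemmas cited by the ports' termination proofs / proof arguments.
lemma pv_pow_one_le (m : Nat) : 1 ≤ (10:Int) ^ m := one_le_pow₀ (by norm_num)

lemma pv_base_min_one_le (n : Int) : 1 ≤ (if n > 1 then (10:Int) ^ (n - 1).toNat else 1) := by
  split_ifs
  · exact pv_pow_one_le _
  · omega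

-- A's multiplier (10^(n·k) − 1) // (10^n − 1) is the geometric sum Σ_{i<k} (10^n)^i
lemma pv_mult_eq_geom (n k : Int) (hn : 1 ≤ n) (hk : 1 ≤ k) :
    PySem.Int.floordiv ((10:Int) ^ (n * k).toNat - 1) ((10:Int) ^ n.toNat - 1)
      = ∑ i ∈ Finset.range k.toNat, ((10:Int) ^ n.toNat) ^ i := by
  have hx : (1:Int) < 10 ^ n.toNat := by
    have h : (10:Int) ^ 1 ≤ 10 ^ n.toNat := pow_le_pow_right₀ (by norm_num) (by omega)
    have : (10:Int) ^ 1 = 10 := by norm_num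
    omega
  have hpow : (10:Int) ^ (n * k).toNat = ((10:Int) ^ n.toNat) ^ k.toNat := by
    rw [← pow_mul]
    congr 1
    have h1 : n = (n.toNat : Int) := (Int.toNat_of_nonneg (by omega)).symm
    have h2 : k = (k.toNat : Int) := (Int.toNat_of_nonneg (by omega)).symm
    rw [h1, h2, ← Nat.cast_mul, Int.toNat_natCast]
    simp only [Int.toNat_natCast]
  have hgeom : (∑ i ∈ Finset.range k.toNat, ((10:Int) ^ n.toNat) ^ i) * ((10:Int) ^ n.toNat - 1)
      = (10:Int) ^ (n * k).toNat - 1 := by rw [hpow]; exact geom_sum_mul _ _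
  rw [PySem.Int.floordiv_eq_ediv_of_pos (by omega), ← hgeom,
    Int.mul_ediv_cancel _ (by omega)]

lemma pv_mult_ge (n k : Int) (hn : 1 ≤ n) (hk : 1 ≤ k) :
    k ≤ PySem.Int.floordiv ((10:Int) ^ (n * k).toNat - 1) ((10:Int) ^ n.toNat - 1) := by
  rw [pv_mult_eq_geom n k hn hk]
  have h : ((k.toNat : Int)) = ∑ _i ∈ Finset.range k.toNat, (1:Int) := by simp
  have h2 : (∑ _i ∈ Finset.range k.toNat, (1:Int))
      ≤ ∑ i ∈ Finset.range k.toNat, ((10:Int) ^ n.toNat) ^ i :=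
    Finset.sum_le_sum (fun i _ => one_le_pow₀ (pv_pow_one_le _))
  omega

-- literal port of A's inner `while True:` loop over k (with its break); Python's locals
-- total_len / multiplier / min_id / x_start / x_end are inlined (max_id is unused by A)
def pvA_kloop (start end_ n base_min base_max : Int) (hn : 1 ≤ n) (hb : 1 ≤ base_min)
    (k : Int) (hk : 2 ≤ k) (s : PySem.Set Int) : PySem.Set Int :=
  if h : base_min * PySem.Int.floordiv ((10:Int) ^ (n * k).toNat - 1) ((10:Int) ^ n.toNat - 1)
      > end_ then s
  else
    pvA_kloop start end_ n base_min base_max hn hb (k + 1) (by omega)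
      ((PySem.List.pyRange
          (max base_min (PySem.Int.floordiv
            (start + PySem.Int.floordiv ((10:Int) ^ (n * k).toNat - 1) ((10:Int) ^ n.toNat - 1) - 1)
            (PySem.Int.floordiv ((10:Int) ^ (n * k).toNat - 1) ((10:Int) ^ n.toNat - 1))))
          (min base_max (PySem.Int.floordiv end_
            (PySem.Int.floordiv ((10:Int) ^ (n * k).toNat - 1) ((10:Int) ^ n.toNat - 1))) + 1) 1).foldl
        (fun acc x =>
          if start ≤ x * PySem.Int.floordiv ((10:Int) ^ (n * k).toNat - 1) ((10:Int) ^ n.toNat - 1)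
              ∧ x * PySem.Int.floordiv ((10:Int) ^ (n * k).toNat - 1) ((10:Int) ^ n.toNat - 1) ≤ end_
          then PySem.Set.add acc
            (x * PySem.Int.floordiv ((10:Int) ^ (n * k).toNat - 1) ((10:Int) ^ n.toNat - 1))
          else acc) s)
termination_by (end_ + 1 - k).toNat
decreasing_by
  have hge := pv_mult_ge n k hn (by omega)
  have hmul : PySem.Int.floordiv ((10:Int) ^ (n * k).toNat - 1) ((10:Int) ^ n.toNat - 1)
      ≤ base_min * PySem.Int.floordiv ((10:Int) ^ (n * k).toNat - 1) ((10:Int) ^ n.toNat - 1) :=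
    le_mul_of_one_le_left (by omega) hb
  omega

-- literal port of A's outer `while True:` loop over n (with its break); Python's locals
-- base_min / base_max / smallest_id are inlined
def pvA_nloop (start end_ : Int) (n : Int) (hn : 1 ≤ n) (s : PySem.Set Int) : PySem.Set Int :=
  if h : (if n > 1 then (10:Int) ^ (n - 1).toNat else 1) * ((10:Int) ^ n.toNat + 1) > end_ then s
  else
    pvA_nloop start end_ (n + 1) (by omega)
      (pvA_kloop start end_ n (if n > 1 then (10:Int) ^ (n - 1).toNat else 1)
        ((10:Int) ^ n.toNat - 1) hn (pv_base_min_one_le n) 2 (by omega) s)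
termination_by (end_ + 1 - n).toNat
decreasing_by
  have hp' : n.toNat < 10 ^ n.toNat := Nat.lt_pow_self (by norm_num)
  have hp : (n.toNat : Int) < (10:Int) ^ n.toNat := by
    have h10 : (((10:Nat) ^ n.toNat : Nat) : Int) = (10:Int) ^ n.toNat := by push_cast; ring
    omega
  have hmul : (10:Int) ^ n.toNat + 1
      ≤ (if n > 1 then (10:Int) ^ (n - 1).toNat else 1) * ((10:Int) ^ n.toNat + 1) :=
    le_mul_of_one_le_left (by omega) (pv_base_min_one_le n)
  simp only [dite_eq_ite] at h
  omega

def generate_invalid_ids_part2_in_range (start : Int) (end_ : Int) : List Int :=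
  pvA_nloop start end_ 1 (by omega) PySem.Set.empty

-- ===== PORT B =====
-- port of B's recursive `reps`: in-range multiples of the Horner-maintained multiplier
def pvB_reps (start end_ : Int) (mult p lo : Int)
    (hm : 1 ≤ mult) (hp : 2 ≤ p) (hl : 1 ≤ lo) : List Int :=
  if h : lo * mult > end_ then []
  else
    ((PySem.List.pyRange lo p 1).filter
        (fun x => decide (start ≤ x * mult) && decide (x * mult ≤ end_))).map (fun x => x * mult)
      ++ pvB_reps start end_ (mult * p + 1) p lo
          (by have := mul_nonneg (by omega : (0:Int) ≤ mult) (by omega : (0:Int) ≤ p); omega)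
          hp hl
termination_by (end_ + 1 - mult).toNat
decreasing_by
  have h1 : mult ≤ lo * mult := le_mul_of_one_le_left (by omega) hl
  have h2 : mult * 2 ≤ mult * p := mul_le_mul_of_nonneg_left hp (by omega)
  simp only [not_lt] at h
  omega

-- port of B's recursive `blocks`: chains `reps` streams over growing block lengths
def pvB_blocks (start end_ : Int) (lo p : Int) (hl : 1 ≤ lo) (hp : 2 ≤ p) : List Int :=
  if h : lo * (p + 1) > end_ then []
  else
    pvB_reps start end_ (p + 1) p lo (by omega) hp hl
      ++ pvB_blocks start end_ p (p * 10) (by omega) (by omega)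
termination_by (end_ + 1 - p).toNat
decreasing_by
  have h1 : p + 1 ≤ lo * (p + 1) := le_mul_of_one_le_left (by omega) hl
  simp only [not_lt] at h
  omega

def generate_invalid_ids_part2_in_range_alt (start : Int) (end_ : Int) : List Int :=
  PySem.Set.ofList (pvB_blocks start end_ 1 10 (by omega) (by omega))

-- ===== PRECONDITION & SPEC =====
def Spec_generate_invalid_ids_part2_in_range (start : Int) (end_ : Int) (out : List Int) : Prop := out = generate_invalid_ids_part2_in_range_alt start end_
instance (start : Int) (end_ : Int) (out : List Int) : Decidable (Spec_generate_invalid_ids_part2_in_range start end_ out) := by unfold Spec_generate_invalid_ids_part2_in_range; infer_instance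

-- ===== CLAIM (what is proved, stated in full; the proofs are below) =====
def Claim_equal_generate_invalid_ids_part2_in_range : Prop := ∀ (start : Int) (end_ : Int), Dom_generate_invalid_ids_part2_in_range start end_ → Spec_generate_invalid_ids_part2_in_range start end_ (generate_invalid_ids_part2_in_range start end_)

-- ===== LEMMAS AND PROOFS =====

-- loop body `if P(x): s.add(...)` as a fold over the filtered list
lemma pv_foldl_guard_filter (P : Int → Prop) [DecidablePred P] (g : List Int → Int → List Int) :
    ∀ (l : List Int) (s : List Int),
      l.foldl (fun acc x => if P x then g acc x else acc) s
        = (l.filter (fun x => decide (P x))).foldl g s := by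
  intro l
  induction l with
  | nil => intro s; simp
  | cons a t ih => intro s; by_cases h : P a <;> simp [h, ih]

-- filtering an interval predicate over a clamped range equals filtering the full range
lemma pv_filter_clamp (c d : Int) (Q : Int → Bool)
    (hQ : ∀ x : Int, Q x = (decide (c ≤ x) && decide (x ≤ d))) (a b : Int) :
    (PySem.List.pyRange (max a c) (min b (d + 1)) 1).filter Q
      = (PySem.List.pyRange a b 1).filter Q := by
  have hnotQ : ∀ x : Int, (x < c ∨ d < x) → Q x = false := by
    intro x hx
    rw [hQ]
    rcases hx with h | h <;> simp <;> omega
  by_cases hab : a < b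
  · by_cases hcd : max a c < min b (d + 1)
    · have e1 : PySem.List.pyRange a b 1
          = PySem.List.pyRange a (max a c) 1 ++ PySem.List.pyRange (max a c) b 1 :=
        PySem.List.pyRange_one_append a (max a c) b (by omega) (by omega)
      have e2 : PySem.List.pyRange (max a c) b 1
          = PySem.List.pyRange (max a c) (min b (d + 1)) 1
              ++ PySem.List.pyRange (min b (d + 1)) b 1 :=
        PySem.List.pyRange_one_append _ (min b (d + 1)) b (by omega) (by omega)
      have f1 : (PySem.List.pyRange a (max a c) 1).filter Q = [] := by
        refine List.filter_eq_nil_iff.mpr ?_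
        intro x hx
        rw [PySem.List.mem_pyRange_one] at hx
        simp [hnotQ x (by omega)]
      have f3 : (PySem.List.pyRange (min b (d + 1)) b 1).filter Q = [] := by
        refine List.filter_eq_nil_iff.mpr ?_
        intro x hx
        rw [PySem.List.mem_pyRange_one] at hx
        simp [hnotQ x (by omega)]
      rw [e1, e2, List.filter_append, List.filter_append, f1, f3]
      simp
    · rw [PySem.List.pyRange_one_eq_nil (by omega)]
      have hall : (PySem.List.pyRange a b 1).filter Q = [] := by
        refine List.filter_eq_nil_iff.mpr ?_
        intro x hx
        rw [PySem.List.mem_pyRange_one] at hx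
        simp [hnotQ x (by omega)]
      rw [hall]
      simp
  · rw [PySem.List.pyRange_one_eq_nil (by omega : (b:Int) ≤ a),
      PySem.List.pyRange_one_eq_nil (by omega)]

-- A's clamped-and-guarded x loop computes B's filtered comprehension stream, folded in
lemma pv_inner_eq (start end_ mult lo p : Int) (hm : 0 < mult) (s : List Int) :
    (PySem.List.pyRange (max lo (PySem.Int.floordiv (start + mult - 1) mult))
        (min (p - 1) (PySem.Int.floordiv end_ mult) + 1) 1).foldl
      (fun acc x =>
        if start ≤ x * mult ∧ x * mult ≤ end_ then PySem.Set.add acc (x * mult) else acc) s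
    = (((PySem.List.pyRange lo p 1).filter
          (fun x => decide (start ≤ x * mult) && decide (x * mult ≤ end_))).map
        (fun x => x * mult)).foldl PySem.Set.add s := by
  have hQ : ∀ x : Int, (decide (start ≤ x * mult ∧ x * mult ≤ end_) : Bool)
      = (decide (PySem.Int.floordiv (start + mult - 1) mult ≤ x)
          && decide (x ≤ PySem.Int.floordiv end_ mult)) := by
    intro x
    have h2 : x ≤ PySem.Int.floordiv end_ mult ↔ x * mult ≤ end_ :=
      PySem.Int.le_floordiv_iff_mul_le hm
    have h1 : x + 1 ≤ PySem.Int.floordiv (start + mult - 1) mult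
        ↔ (x + 1) * mult ≤ start + mult - 1 := PySem.Int.le_floordiv_iff_mul_le hm
    rw [add_one_mul] at h1
    rw [Bool.decide_and]
    congr 1 <;> rw [decide_eq_decide] <;> omega
  rw [pv_foldl_guard_filter (fun x => start ≤ x * mult ∧ x * mult ≤ end_)
    (fun acc x => PySem.Set.add acc (x * mult)), List.foldl_map]
  have hmin : min (p - 1) (PySem.Int.floordiv end_ mult) + 1
      = min p (PySem.Int.floordiv end_ mult + 1) := by omega
  rw [hmin, pv_filter_clamp (PySem.Int.floordiv (start + mult - 1) mult)
    (PySem.Int.floordiv end_ mult) _ hQ lo p]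
  congr 1
  apply List.filter_congr
  intro x _
  rw [Bool.decide_and]

lemma pv_pow_two_le (n : Int) (hn : 1 ≤ n) : 2 ≤ (10:Int) ^ n.toNat := by
  have h : (10:Int) ^ 1 ≤ 10 ^ n.toNat := pow_le_pow_right₀ (by norm_num) (by omega)
  have h2 : (10:Int) ^ 1 = 10 := by norm_num
  omega

lemma pv_mult_one_le (n k : Int) (hn : 1 ≤ n) (hk : 1 ≤ k) :
    1 ≤ PySem.Int.floordiv ((10:Int) ^ (n * k).toNat - 1) ((10:Int) ^ n.toNat - 1) := by
  have := pv_mult_ge n k hn hk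
  omega

-- Horner recurrence of the multiplier: M(n,k+1) = M(n,k)·10^n + 1
lemma pv_mult_succ (n k : Int) (hn : 1 ≤ n) (hk : 1 ≤ k) :
    PySem.Int.floordiv ((10:Int) ^ (n * (k + 1)).toNat - 1) ((10:Int) ^ n.toNat - 1)
      = PySem.Int.floordiv ((10:Int) ^ (n * k).toNat - 1) ((10:Int) ^ n.toNat - 1)
          * (10:Int) ^ n.toNat + 1 := by
  rw [pv_mult_eq_geom n (k + 1) hn (by omega), pv_mult_eq_geom n k hn hk]
  have hs : (k + 1).toNat = k.toNat + 1 := by omega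
  rw [hs, geom_sum_succ]
  ring

lemma pv_mult_two (n : Int) (hn : 1 ≤ n) :
    PySem.Int.floordiv ((10:Int) ^ (n * 2).toNat - 1) ((10:Int) ^ n.toNat - 1)
      = (10:Int) ^ n.toNat + 1 := by
  rw [pv_mult_eq_geom n 2 hn (by omega)]
  have h2 : ((2:Int)).toNat = 2 := rfl
  rw [h2]
  simp [Finset.sum_range_succ]
  omega

-- proof-irrelevant congruence helpers for B's recursors
lemma pv_reps_congr (start end_ : Int) {m1 m2 p1 p2 l1 l2 : Int}
    (hm : m1 = m2) (hp : p1 = p2) (hl : l1 = l2)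
    (a1 : 1 ≤ m1) (a2 : 2 ≤ p1) (a3 : 1 ≤ l1)
    (b1 : 1 ≤ m2) (b2 : 2 ≤ p2) (b3 : 1 ≤ l2) :
    pvB_reps start end_ m1 p1 l1 a1 a2 a3 = pvB_reps start end_ m2 p2 l2 b1 b2 b3 := by
  subst hm; subst hp; subst hl; rfl

lemma pv_blocks_congr (start end_ : Int) {l1 l2 p1 p2 : Int} (hl : l1 = l2) (hp : p1 = p2)
    (h1 : 1 ≤ l1) (h2 : 2 ≤ p1) (h1' : 1 ≤ l2) (h2' : 2 ≤ p2) :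
    pvB_blocks start end_ l1 p1 h1 h2 = pvB_blocks start end_ l2 p2 h1' h2' := by
  subst hl; subst hp; rfl

-- A's k loop folds B's `reps` stream into the set
theorem pvA_kloop_eq (start end_ n : Int) (hn : 1 ≤ n) (base_min base_max : Int)
    (hb : 1 ≤ base_min) (hbm : base_min = (10:Int) ^ (n - 1).toNat)
    (hbx : base_max = (10:Int) ^ n.toNat - 1) (k : Int) (hk : 2 ≤ k) (s : List Int) :
    pvA_kloop start end_ n base_min base_max hn hb k hk s
      = (pvB_reps start end_
          (PySem.Int.floordiv ((10:Int) ^ (n * k).toNat - 1) ((10:Int) ^ n.toNat - 1))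
          ((10:Int) ^ n.toNat) base_min
          (pv_mult_one_le n k hn (by omega)) (pv_pow_two_le n hn) hb).foldl
          PySem.Set.add s := by
  conv_lhs => rw [pvA_kloop]
  conv_rhs => rw [pvB_reps]
  by_cases h : base_min
      * PySem.Int.floordiv ((10:Int) ^ (n * k).toNat - 1) ((10:Int) ^ n.toNat - 1) > end_
  · rw [dif_pos h, dif_pos h]
    rfl
  · rw [dif_neg h, dif_neg h, List.foldl_append]
    rw [hbx, pv_inner_eq start end_ _ base_min ((10:Int) ^ n.toNat)
      (by have := pv_mult_one_le n k hn (by omega); omega) s]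
    rw [pvA_kloop_eq start end_ n hn base_min ((10:Int) ^ n.toNat - 1) hb hbm rfl (k + 1)
      (by omega) _]
    exact congrArg (fun l => List.foldl PySem.Set.add _ l)
      (pv_reps_congr start end_ (pv_mult_succ n k hn (by omega)) rfl rfl _ _ _ _ _ _)
termination_by (end_ + 1 - k).toNat
decreasing_by
  have hge := pv_mult_ge n k hn (by omega)
  have hmul : PySem.Int.floordiv ((10:Int) ^ (n * k).toNat - 1) ((10:Int) ^ n.toNat - 1)
      ≤ base_min * PySem.Int.floordiv ((10:Int) ^ (n * k).toNat - 1) ((10:Int) ^ n.toNat - 1) :=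
    le_mul_of_one_le_left (by omega) hb
  omega

-- A's n loop folds B's `blocks` stream into the set
theorem pvA_nloop_eq (start end_ : Int) (n : Int) (hn : 1 ≤ n) (s : List Int) :
    pvA_nloop start end_ n hn s
      = (pvB_blocks start end_ ((10:Int) ^ (n - 1).toNat) ((10:Int) ^ n.toNat)
          (pv_pow_one_le _) (pv_pow_two_le n hn)).foldl PySem.Set.add s := by
  have hbm : (if n > 1 then (10:Int) ^ (n - 1).toNat else 1) = (10:Int) ^ (n - 1).toNat := by
    split_ifs with h
    · rfl
    · have h1 : n = 1 := by omega
      subst h1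
      norm_num
  conv_lhs => rw [pvA_nloop]
  conv_rhs => rw [pvB_blocks]
  by_cases h : (if n > 1 then (10:Int) ^ (n - 1).toNat else 1) * ((10:Int) ^ n.toNat + 1) > end_
  · rw [dif_pos h, dif_pos (by rw [← hbm]; exact h)]
    rfl
  · rw [dif_neg h, dif_neg (by rw [← hbm]; exact h), List.foldl_append]
    rw [pvA_kloop_eq start end_ n hn _ _ (pv_base_min_one_le n) hbm rfl 2 (by omega) s]
    rw [pv_reps_congr start end_ (pv_mult_two n hn) rfl hbm
      (pv_mult_one_le n 2 hn (by omega)) (pv_pow_two_le n hn) (pv_base_min_one_le n)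
      (by have := pv_pow_two_le n hn; omega) (pv_pow_two_le n hn) (pv_pow_one_le _)]
    refine Eq.trans (pvA_nloop_eq start end_ (n + 1) (by omega) _) ?_
    have hlo : (10:Int) ^ ((n + 1) - 1).toNat = (10:Int) ^ n.toNat := by
      congr 1
      omega
    have hp : (10:Int) ^ (n + 1).toNat = (10:Int) ^ n.toNat * 10 := by
      have hs : (n + 1).toNat = n.toNat + 1 := by omega
      rw [hs, pow_succ]
    exact congrArg (fun l => List.foldl PySem.Set.add _ l)
      (pv_blocks_congr start end_ hlo hp (pv_pow_one_le _) (pv_pow_two_le _ (by omega))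
        (pv_pow_one_le _) (by rw [← hp]; exact pv_pow_two_le _ (by omega)))
termination_by (end_ + 1 - n).toNat
decreasing_by
  have hp' : n.toNat < 10 ^ n.toNat := Nat.lt_pow_self (by norm_num)
  have hp : (n.toNat : Int) < (10:Int) ^ n.toNat := by
    have h10 : (((10:Nat) ^ n.toNat : Nat) : Int) = (10:Int) ^ n.toNat := by push_cast; ring
    omega
  have hmul : (10:Int) ^ n.toNat + 1
      ≤ (if n > 1 then (10:Int) ^ (n - 1).toNat else 1) * ((10:Int) ^ n.toNat + 1) :=
    le_mul_of_one_le_left (by omega) (pv_base_min_one_le n)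
  omega

-- ===== VERDICT (by name: the statement is the Claim_ definition above) =====
theorem generate_invalid_ids_part2_in_range_spec : Claim_equal_generate_invalid_ids_part2_in_range := by
  intro start end_ _
  unfold Spec_generate_invalid_ids_part2_in_range
  unfold generate_invalid_ids_part2_in_range generate_invalid_ids_part2_in_range_alt
  rw [pvA_nloop_eq start end_ 1 (by omega) PySem.Set.empty, PySem.Set.ofList_eq_foldl]
  have h1 : (10:Int) ^ ((1:Int) - 1).toNat = 1 := by norm_num
  have h2 : (10:Int) ^ ((1:Int)).toNat = 10 := by norm_num
  rw [pv_blocks_congr start end_ h1 h2 _ _ (by omega) (by omega)]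
  rfl
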